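-- pv_equiv track=rewrite | github.com/Chenke0023/skyscanner_multi_domain | skyscanner_neo.py | match_sort_label
-- ===== SOURCE A (Python) =====
-- from typing import Any, Iterable, Optional
--
-- def match_sort_label(
--     line_text: str, labels: tuple[str, ...]
-- ) -> Optional[tuple[str, int]]:
--     stripped = line_text.strip()
--     lowered = stripped.lower()
--     for label in sorted(labels, key=len, reverse=True):
--         label_lower = label.lower()
--         if lowered == label_lower:
--             return label, 3
--         if lowered.startswith(label_lower):
--             return label, 2
--         if lowered.lstrip("•- ").startswith(label_lower):
--             return label, 1
--     return None
-- ===== SOURCE B (Python) =====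
-- from typing import Optional
--
-- def match_sort_label(
--     line_text: str, labels: tuple[str, ...]
-- ) -> Optional[tuple[str, int]]:
--     # One pass in original order, no sorting: keep the matching label of strictly
--     # greatest length (strict '>' reproduces the stable longest-first tie-break).
--     lowered = line_text.strip().lower()
--     bullet_stripped = lowered.lstrip("\u2022- ")
--     best = None  # (label, score, len(label))
--     for label in labels:
--         label_lower = label.lower()
--         if lowered == label_lower:
--             score = 3
--         elif lowered.startswith(label_lower):
--             score = 2
--         elif bullet_stripped.startswith(label_lower):
--             score = 1
--         else:
--             continue
--         if best is None or len(label) > best[2]: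
--             best = (label, score, len(label))
--     return None if best is None else (best[0], best[1])
-- ===== Notes on version B (the rewrite author's own statement) =====
-- stated objective: alternative
-- what changed: Replaces sort-by-length + first-match early return with a single unsorted pass that keeps the matching label of strictly greatest length (strict > preserves the stable tie-break), hoisting the lstrip out of the loop.
import Mathlib
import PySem

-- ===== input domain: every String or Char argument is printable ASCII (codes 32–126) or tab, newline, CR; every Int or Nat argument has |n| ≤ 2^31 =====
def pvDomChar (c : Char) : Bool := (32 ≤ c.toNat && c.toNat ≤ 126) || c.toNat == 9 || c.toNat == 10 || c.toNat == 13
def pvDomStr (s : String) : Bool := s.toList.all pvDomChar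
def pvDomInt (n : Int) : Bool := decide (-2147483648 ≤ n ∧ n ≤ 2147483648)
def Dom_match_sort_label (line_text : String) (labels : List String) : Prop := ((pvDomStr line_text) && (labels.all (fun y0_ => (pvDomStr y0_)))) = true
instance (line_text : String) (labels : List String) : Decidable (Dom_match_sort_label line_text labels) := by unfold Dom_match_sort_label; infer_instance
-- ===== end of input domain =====

-- B replaces A's sort-by-length + first-match early return by one unsorted pass keeping the
-- matching label of strictly greatest length (same results; no speed claim).

-- Python s.lstrip(chars): drop leading characters belonging to the set (exact port, used by both sides)
def pyLstripChars (s : String) (chars : List Char) : String :=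
  String.ofList (s.toList.dropWhile (fun c => chars.contains c))

-- ===== PORT A =====
def matchLoopA (lowered : String) : List String → Option (String × Int)
  | [] => none
  | label :: rest =>
    let label_lower := PySem.Str.lower label
    if lowered == label_lower then some (label, 3)
    else if PySem.Str.startswith lowered label_lower then some (label, 2)
    else if PySem.Str.startswith (pyLstripChars lowered ['•', '-', ' ']) label_lower then
      some (label, 1)
    else matchLoopA lowered rest

def match_sort_label (line_text : String) (labels : List String) : Option (String × Int) :=
  let stripped := PySem.Str.strip line_text
  let lowered := PySem.Str.lower stripped
  matchLoopA lowered (PySem.List.sorted labels (fun l => PySem.Str.len l) true)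

-- ===== PORT B =====
def bStep (lowered bullet : String) (best : Option (String × Int × Int)) (label : String) :
    Option (String × Int × Int) :=
  let label_lower := PySem.Str.lower label
  let score : Int :=
    if lowered == label_lower then 3
    else if PySem.Str.startswith lowered label_lower then 2
    else if PySem.Str.startswith bullet label_lower then 1
    else 0
  if score == 0 then best
  else match best with
    | none => some (label, score, PySem.Str.len label)
    | some (_, _, n) =>
        if n < PySem.Str.len label then some (label, score, PySem.Str.len label) else best

def match_sort_label_alt (line_text : String) (labels : List String) : Option (String × Int) :=
  let lowered := PySem.Str.lower (PySem.Str.strip line_text)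
  let bullet := pyLstripChars lowered ['•', '-', ' ']
  match labels.foldl (bStep lowered bullet) none with
  | none => none
  | some (label, score, _) => some (label, score)

-- ===== PRECONDITION & SPEC =====
def Spec_match_sort_label (line_text : String) (labels : List String) (out : Option (String × Int)) : Prop := out = match_sort_label_alt line_text labels
instance (line_text : String) (labels : List String) (out : Option (String × Int)) : Decidable (Spec_match_sort_label line_text labels out) := by unfold Spec_match_sort_label; infer_instance

-- ===== CLAIM (what is proved, stated in full; the proofs are below) =====
def Claim_equal_match_sort_label : Prop := ∀ (line_text : String) (labels : List String), Dom_match_sort_label line_text labels → Spec_match_sort_label line_text labels (match_sort_label line_text labels)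

-- ===== LEMMAS AND PROOFS =====

-- the per-label match test shared by both readings of the loop body
def fmatch (lowered bullet label : String) : Option (String × Int) :=
  let ll := PySem.Str.lower label
  if lowered == ll then some (label, 3)
  else if PySem.Str.startswith lowered ll then some (label, 2)
  else if PySem.Str.startswith bullet ll then some (label, 1)
  else none

def viewBest (s : Option (String × Int × Int)) : Option (String × Int) :=
  s.map (fun t => (t.1, t.2.1))

lemma matchLoopA_eq (lowered : String) (xs : List String) :
    matchLoopA lowered xs =
      List.findSome? (fmatch lowered (pyLstripChars lowered ['•', '-', ' '])) xs := by
  induction xs with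
  | nil => simp [matchLoopA]
  | cons x xs ih =>
      simp only [matchLoopA, fmatch, List.findSome?_cons]
      split_ifs <;> simp_all

lemma bStep_eq (lowered bullet : String) (s : Option (String × Int × Int)) (x : String) :
    bStep lowered bullet s x =
      match fmatch lowered bullet x with
      | none => s
      | some v =>
        match s with
        | none => some (v.1, v.2, PySem.Str.len x)
        | some (_, _, n) =>
            if n < PySem.Str.len x then some (v.1, v.2, PySem.Str.len x) else s := by
  simp only [bStep, fmatch]
  split_ifs <;> simp_all

lemma insertBy_split {α : Type} (p : α → α → Bool) (x : α) (l : List α) :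
    PySem.List.insertBy p x l =
      l.takeWhile (fun y => !(p x y)) ++ x :: l.dropWhile (fun y => !(p x y)) := by
  induction l with
  | nil => simp [PySem.List.insertBy]
  | cons y ys ih =>
      by_cases h : p x y = true <;>
        simp [PySem.List.insertBy, h, ih]

lemma dropWhile_lt {α : Type} (key : α → Int) (x : α) (l : List α)
    (hp : l.Pairwise (fun a b => key b ≤ key a)) :
    ∀ y ∈ l.dropWhile (fun y => !(decide (key y < key x))), key y < key x := by
  induction l with
  | nil => simp
  | cons a l ih =>
      rw [List.pairwise_cons] at hp
      by_cases h : key a < key x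
      · intro y hy
        rw [List.dropWhile_cons] at hy
        simp only [h, decide_true, Bool.not_true] at hy
        simp at hy
        rcases hy with rfl | hy
        · exact h
        · exact lt_of_le_of_lt (hp.1 y hy) h
      · intro y hy
        rw [List.dropWhile_cons] at hy
        simp only [h, decide_false, Bool.not_false] at hy
        exact ih hp.2 y hy

-- the invariant carried through B's fold / A's insertion sort
def MInv (lowered bullet : String) (l : List String) (s : Option (String × Int × Int)) : Prop :=
  List.findSome? (fmatch lowered bullet) l = viewBest s ∧
  (∀ lab sc n, s = some (lab, sc, n) →
    (∃ b ∈ l, PySem.Str.len b = n ∧ fmatch lowered bullet b = some (lab, sc)) ∧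
    (∀ y ∈ l, fmatch lowered bullet y ≠ none → PySem.Str.len y ≤ n))

lemma main_lemma (lowered bullet : String) :
    ∀ (xs l : List String) (s : Option (String × Int × Int)),
      l.Pairwise (fun a b => PySem.Str.len b ≤ PySem.Str.len a) →
      MInv lowered bullet l s →
      List.findSome? (fmatch lowered bullet)
          (List.foldl (fun acc x =>
            PySem.List.insertBy (fun a b => decide (PySem.Str.len b < PySem.Str.len a)) x acc)
            l xs) =
        viewBest (List.foldl (bStep lowered bullet) s xs) := by
  intro xs
  induction xs with
  | nil => intro l s _ hinv; exact hinv.1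
  | cons x xs ih =>
      intro l s hp hinv
      simp only [List.foldl_cons]
      set key : String → Int := fun l => PySem.Str.len l with hkey
      set p : String → Bool := fun y => !(decide (PySem.Str.len y < PySem.Str.len x)) with hpdef
      have hsplit := insertBy_split (fun a b => decide (PySem.Str.len b < PySem.Str.len a)) x l
      set t := l.takeWhile p with ht
      set d := l.dropWhile p with hd
      have htake : ∀ y ∈ t, PySem.Str.len x ≤ PySem.Str.len y := by
        intro y hy
        have := List.mem_takeWhile_imp hy
        simp only [hpdef, Bool.not_eq_true', decide_eq_false_iff_not, not_lt] at this
        exact this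
      have hdrop : ∀ y ∈ d, PySem.Str.len y < PySem.Str.len x :=
        dropWhile_lt (fun l => PySem.Str.len l) x l hp
      have htd : t ++ d = l := List.takeWhile_append_dropWhile
      have hmem : ∀ y ∈ l, y ∈ t ∨ y ∈ d := by
        intro y hy; rw [← htd] at hy; exact List.mem_append.mp hy
      have hl' : PySem.List.insertBy (fun a b => decide (PySem.Str.len b < PySem.Str.len a)) x l
          = t ++ x :: d := hsplit
      -- pairwise of the new list
      have hp' : (t ++ x :: d).Pairwise (fun a b => PySem.Str.len b ≤ PySem.Str.len a) := by
        have hpt : t.Pairwise (fun a b => PySem.Str.len b ≤ PySem.Str.len a) :=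
          hp.sublist (List.takeWhile_sublist _)
        have hpd : d.Pairwise (fun a b => PySem.Str.len b ≤ PySem.Str.len a) :=
          hp.sublist (List.dropWhile_sublist _)
        rw [List.pairwise_append]
        refine ⟨hpt, ?_, ?_⟩
        · rw [List.pairwise_cons]
          exact ⟨fun y hy => le_of_lt (hdrop y hy), hpd⟩
        · intro a ha b hb
          rcases List.mem_cons.mp hb with rfl | hb
          · exact htake a ha
          · exact le_trans (le_of_lt (hdrop b hb)) (htake a ha)
      rw [hl']
      -- establish the invariant for the new list and state
      apply ih (t ++ x :: d) (bStep lowered bullet s x) hp'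
      rw [bStep_eq]
      rcases hfx : fmatch lowered bullet x with _ | ⟨lab0, sc0⟩
      · -- x does not match: list findSome? unchanged, state unchanged
        constructor
        · rw [List.findSome?_append, List.findSome?_cons, hfx, ← List.findSome?_append, htd]
          exact hinv.1
        · intro lab sc n hs
          obtain ⟨⟨b, hbl, hbn, hbm⟩, hbound⟩ := hinv.2 lab sc n hs
          refine ⟨⟨b, ?_, hbn, hbm⟩, ?_⟩
          · rcases hmem b hbl with h | h
            · exact List.mem_append.mpr (Or.inl h)
            · exact List.mem_append.mpr (Or.inr (List.mem_cons.mpr (Or.inr h)))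
          · intro y hy hym
            rcases List.mem_append.mp hy with h | h
            · exact hbound y (by rw [← htd]; exact List.mem_append.mpr (Or.inl h)) hym
            · rcases List.mem_cons.mp h with rfl | h
              · exact absurd hfx hym
              · exact hbound y (by rw [← htd]; exact List.mem_append.mpr (Or.inr h)) hym
      · -- x matches with value (lab0, sc0); note lab0 = x by fmatch's shape
        have hlab0 : lab0 = x := by
          simp only [fmatch] at hfx
          split_ifs at hfx <;> simp_all
        rcases s with _ | ⟨lab, sc, n⟩
        · -- no previous best: everything in l is a non-match
          have hnone : ∀ y ∈ l, fmatch lowered bullet y = none := by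
            have := hinv.1
            simp only [viewBest, Option.map_none] at this
            exact List.findSome?_eq_none_iff.mp this
          constructor
          · rw [List.findSome?_append, List.findSome?_cons, hfx]
            have h1 : List.findSome? (fmatch lowered bullet) t = none :=
              List.findSome?_eq_none_iff.mpr (fun y hy =>
                hnone y (by rw [← htd]; exact List.mem_append.mpr (Or.inl hy)))
            rw [h1]
            simp [viewBest]
          · intro lab sc n hs
            injection hs with h1
            injection h1 with e1 h2
            injection h2 with e2 e3
            subst e1; subst e2; subst e3
            refine ⟨⟨x, List.mem_append.mpr (Or.inr (List.mem_cons_self)), rfl, hfx⟩, ?_⟩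
            intro y hy hym
            rcases List.mem_append.mp hy with h | h
            · exact absurd (hnone y (by rw [← htd]; exact List.mem_append.mpr (Or.inl h))) hym
            · rcases List.mem_cons.mp h with rfl | h
              · exact le_refl _
              · exact absurd (hnone y (by rw [← htd]; exact List.mem_append.mpr (Or.inr h))) hym
        · obtain ⟨⟨b, hbl, hbn, hbm⟩, hbound⟩ := hinv.2 lab sc n rfl
          by_cases hcmp : n < PySem.Str.len x
          · -- new label strictly longer: it wins
            simp only [if_pos hcmp]
            have hnoneT : List.findSome? (fmatch lowered bullet) t = none := by
              apply List.findSome?_eq_none_iff.mpr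
              intro y hy
              by_contra hne
              have h1 := hbound y (by rw [← htd]; exact List.mem_append.mpr (Or.inl hy)) hne
              have h2 := htake y hy
              omega
            constructor
            · rw [List.findSome?_append, List.findSome?_cons, hfx, hnoneT]
              simp [viewBest]
            · intro lab' sc' n' hs
              injection hs with h1
              injection h1 with e1 h2
              injection h2 with e2 e3
              subst e1; subst e2; subst e3
              refine ⟨⟨x, List.mem_append.mpr (Or.inr (List.mem_cons_self)), rfl, hfx⟩, ?_⟩
              intro y hy hym
              rcases List.mem_append.mp hy with h | h
              · have := hbound y (by rw [← htd]; exact List.mem_append.mpr (Or.inl h)) hym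
                omega
              · rcases List.mem_cons.mp h with rfl | h
                · exact le_refl _
                · have := hbound y (by rw [← htd]; exact List.mem_append.mpr (Or.inr h)) hym
                  omega
          · -- previous best at least as long: it stays
            simp only [if_neg hcmp]
            have hT : List.findSome? (fmatch lowered bullet) t = some (lab, sc) := by
              rcases hTc : List.findSome? (fmatch lowered bullet) t with _ | w
              · exfalso
                have hfl : List.findSome? (fmatch lowered bullet) l = some (lab, sc) := by
                  have := hinv.1; simpa [viewBest] using this
                rw [← htd, List.findSome?_append, hTc] at hfl
                simp only [Option.none_or] at hfl
                -- the witness b with len b = n must lie in d, but d's lengths are < len x ≤ n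
                rcases hmem b hbl with h | h
                · have := List.findSome?_eq_none_iff.mp hTc b h
                  rw [this] at hbm; simp at hbm
                · have h1 := hdrop b h
                  omega
              · have hfl : List.findSome? (fmatch lowered bullet) l = some (lab, sc) := by
                  have := hinv.1; simpa [viewBest] using this
                rw [← htd, List.findSome?_append, hTc] at hfl
                simp only [Option.some_or] at hfl
                exact hfl
            constructor
            · rw [List.findSome?_append, hT]
              simp [viewBest]
            · intro lab' sc' n' hs
              injection hs with h1
              injection h1 with e1 h2
              injection h2 with e2 e3
              subst e1; subst e2; subst e3
              refine ⟨⟨b, ?_, hbn, hbm⟩, ?_⟩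
              · rcases hmem b hbl with h | h
                · exact List.mem_append.mpr (Or.inl h)
                · exact List.mem_append.mpr (Or.inr (List.mem_cons.mpr (Or.inr h)))
              · intro y hy hym
                rcases List.mem_append.mp hy with h | h
                · exact hbound y (by rw [← htd]; exact List.mem_append.mpr (Or.inl h)) hym
                · rcases List.mem_cons.mp h with rfl | h
                  · omega
                  · exact hbound y (by rw [← htd]; exact List.mem_append.mpr (Or.inr h)) hym

lemma view_match (o : Option (String × Int × Int)) :
    (match o with
      | none => none
      | some (label, score, _) => some (label, score)) = viewBest o := by
  rcases o with _ | ⟨a, b, c⟩ <;> simp [viewBest]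

-- ===== VERDICT (by name: the statement is the Claim_ definition above) =====
theorem match_sort_label_spec : Claim_equal_match_sort_label := by
  intro line_text labels _
  unfold Spec_match_sort_label match_sort_label match_sort_label_alt
  rw [view_match, matchLoopA_eq, PySem.List.sorted_rev_eq_foldl_insertBy]
  exact main_lemma _ _ labels [] none List.Pairwise.nil ⟨rfl, by intro _ _ _ h; cases h⟩
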